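-- pv_equiv track=rewrite | github.com/shifenghuci/IR24W-A2-G8 | scraper.py | exceedRepeatedThreshold
-- ===== SOURCE A (Python) =====
-- def exceedRepeatedThreshold(url)-> True|False:
--     #return true indicating if the url's path contain repeated pattern that exceed a certain threshold
--     '''
--     Definition of threshold
--     THRESHOLD = 1 We don't allow there to be recurring path
--
--     THRESHOLD = 2 We allowed once recurrent, but more than that smell fishy
--
--     '''
--     repeat_THRESHOLD = 1 #if the same token appear more than three time in the path, the url is consider a trap that has infinite pattern
--     d = {}
--     tokens = url.split('/')
--     for x in tokens:
--         if x != '':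
--             d[x] = d.get(x,0) + 1 #record frequency of token
--     return any(value > repeat_THRESHOLD for value in d.values())
-- ===== SOURCE B (Python) =====
-- def exceedRepeatedThreshold(url):
--     tokens = [t for t in url.split('/') if t != '']
--     return len(tokens) != len(set(tokens))
-- ===== Notes on version B (the rewrite author's own statement) =====
-- stated objective: simpler
-- what changed: Drops the frequency dict and the any()-scan over its values: B filters the non-empty path tokens once and answers by comparing the token count with the distinct-token count.
import Mathlib
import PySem

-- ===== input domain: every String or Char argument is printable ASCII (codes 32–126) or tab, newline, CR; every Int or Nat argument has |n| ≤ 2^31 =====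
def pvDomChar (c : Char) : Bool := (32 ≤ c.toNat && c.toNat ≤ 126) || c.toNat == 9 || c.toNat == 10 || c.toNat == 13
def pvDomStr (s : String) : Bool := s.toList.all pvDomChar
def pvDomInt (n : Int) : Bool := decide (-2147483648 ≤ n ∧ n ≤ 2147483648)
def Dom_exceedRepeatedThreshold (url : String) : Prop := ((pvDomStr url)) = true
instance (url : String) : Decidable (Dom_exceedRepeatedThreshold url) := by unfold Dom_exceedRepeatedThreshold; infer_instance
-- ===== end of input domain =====

-- B replaces A's frequency dict and any()-scan with a count-vs-distinct-count comparison (objective: simpler).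

-- ===== PORT A =====
def exceedRepeatedThreshold (url : String) : Bool :=
  let tokens := (PySem.Str.split? url "/").getD []
  let d := tokens.foldl
    (fun d x => if x ≠ "" then d.insert x (d.getD x 0 + 1) else d)
    (PySem.Dict.empty : PySem.Dict String Int)
  d.values.any (fun v => v > 1)

-- ===== PORT B =====
def exceedRepeatedThreshold_alt (url : String) : Bool :=
  let tokens := ((PySem.Str.split? url "/").getD []).filter (fun t => t ≠ "")
  decide (tokens.length ≠ (PySem.Set.ofList tokens).length)

-- ===== PRECONDITION & SPEC =====
def Spec_exceedRepeatedThreshold (url : String) (out : Bool) : Prop := out = exceedRepeatedThreshold_alt url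
instance (url : String) (out : Bool) : Decidable (Spec_exceedRepeatedThreshold url out) := by unfold Spec_exceedRepeatedThreshold; infer_instance

-- ===== CLAIM (what is proved, stated in full; the proofs are below) =====
def Claim_equal_exceedRepeatedThreshold : Prop := ∀ (url : String), Dom_exceedRepeatedThreshold url → Spec_exceedRepeatedThreshold url (exceedRepeatedThreshold url)

-- ===== LEMMAS AND PROOFS =====

-- A's guarded fold is the fold over the filtered list.
theorem foldl_if_eq_foldl_filter {α β : Type} (p : α → Prop) [DecidablePred p] (f : β → α → β)
    (l : List α) (b : β) :
    l.foldl (fun d x => if p x then f d x else d) b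
      = (l.filter (fun x => decide (p x))).foldl f b := by
  induction l generalizing b with
  | nil => rfl
  | cons x xs ih =>
    simp only [List.foldl, List.filter]
    by_cases h : p x
    · simp [h, ih]
    · simp [h, ih]

-- A's dict, over the filtered tokens, is Counter(ts); its values are the counts of the distinct tokens.
theorem exceedA_eq_any_count (ts : List String) :
    (ts.foldl (fun d x => d.insert x (d.getD x 0 + 1))
      (PySem.Dict.empty : PySem.Dict String Int)).values.any (fun v => v > 1)
      = (PySem.Set.ofList ts).any (fun k => decide ((ts.count k : Int) > 1)) := by
  rw [PySem.Dict.foldl_insert_getD_add_one_eq_counter]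
  have h : (PySem.Dict.counter ts).values
      = (PySem.Set.ofList ts).map (fun k => (ts.count k : Int)) := by
    have := PySem.Dict.items_counter (xs := ts)
    simp [PySem.Dict.values, this]
  rw [h, List.any_map]
  rfl

theorem nodup_iff_len_eq {α : Type} [DecidableEq α] (ts : List α) :
    ts.Nodup ↔ ts.length = (PySem.Set.ofList ts).length := by
  constructor
  · intro h; rw [PySem.Set.ofList_eq_self_of_nodup ts h]
  · intro h
    have hperm : (PySem.Set.ofList ts).Perm ts.dedup := by
      rw [List.perm_ext_iff_of_nodup (PySem.Set.nodup_ofList ts) ts.nodup_dedup]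
      intro a; rw [PySem.Set.mem_ofList, List.mem_dedup]
    have hlen : ts.dedup.length = ts.length := by
      rw [← hperm.length_eq, ← h]
    have : ts.dedup = ts := (ts.dedup_sublist).eq_of_length hlen
    rw [← this]; exact ts.nodup_dedup

theorem any_count_iff_dup (ts : List String) :
    (PySem.Set.ofList ts).any (fun k => decide ((ts.count k : Int) > 1))
      = decide (ts.length ≠ (PySem.Set.ofList ts).length) := by
  have hlen := nodup_iff_len_eq ts
  have hany : ((PySem.Set.ofList ts).any (fun k => decide ((ts.count k : Int) > 1)) = true)
      ↔ ¬ ts.Nodup := by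
    rw [List.any_eq_true, List.nodup_iff_count_le_one]
    push Not
    constructor
    · rintro ⟨k, hk, hc⟩
      simp only [decide_eq_true_eq] at hc
      exact ⟨k, by exact_mod_cast by omega⟩
    · rintro ⟨k, hk⟩
      have hmem : k ∈ ts := List.count_pos_iff.mp (by omega)
      refine ⟨k, (PySem.Set.mem_ofList ts k).mpr hmem, ?_⟩
      simp only [decide_eq_true_eq]
      exact_mod_cast by omega
  by_cases hnd : ts.Nodup
  · have h2 : ts.length = (PySem.Set.ofList ts).length := hlen.mp hnd
    simp only [h2, ne_eq, not_true_eq_false, decide_false]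
    rw [Bool.eq_false_iff]
    intro h; exact (hany.mp h) hnd
  · have h2 : ts.length ≠ (PySem.Set.ofList ts).length := fun he => hnd (hlen.mpr he)
    simp only [ne_eq, h2, not_false_eq_true, decide_true]
    exact hany.mpr hnd

-- ===== VERDICT (by name: the statement is the Claim_ definition above) =====
theorem exceedRepeatedThreshold_spec : Claim_equal_exceedRepeatedThreshold := by
  intro url _
  unfold Spec_exceedRepeatedThreshold exceedRepeatedThreshold exceedRepeatedThreshold_alt
  simp only []
  rw [foldl_if_eq_foldl_filter (fun x => x ≠ ""), exceedA_eq_any_count, any_count_iff_dup]
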